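-- pv_equiv track=rewrite | github.com/Dmitriy-Schneider/ParserMaterial | zknives_compare.py | parse_standard_info
-- ===== SOURCE A (Python) =====
-- STANDARD_PREFIXES = [
--     "BS EN",
--     "GB/T",
--     "GOST R",
--     "AISI",
--     "ASTM",
--     "UNS",
--     "SAE",
--     "GOST",
--     "DIN",
--     "EN",
--     "ISO",
--     "JIS",
--     "GB",
--     "BS",
--     "AFNOR",
--     "NF",
--     "UNI",
--     "SIS",
--     "SS",
--     "PN",
--     "CSN",
--     "KS",
--     "AS",
--     "SABS",
-- ]
--
-- def parse_standard_info(standard):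
--     if not standard:
--         return None, None, None
--
--     standard = standard.strip()
--     if not standard:
--         return None, None, None
--
--     if "," in standard:
--         standard_part, country = standard.rsplit(",", 1)
--         standard_part = standard_part.strip()
--         country = country.strip()
--     else:
--         standard_part = standard
--         country = None
--
--     upper_part = standard_part.upper()
--     prefix = None
--     for candidate in STANDARD_PREFIXES:
--         if upper_part.startswith(candidate):
--             prefix = candidate
--             break
--
--     if prefix:
--         return "government", prefix, country
--
--     return "proprietary", standard_part, country
-- ===== SOURCE B (Python) =====
-- STANDARD_PREFIXES = [
--     "BS EN",
--     "GB/T",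
--     "GOST R",
--     "AISI",
--     "ASTM",
--     "UNS",
--     "SAE",
--     "GOST",
--     "DIN",
--     "EN",
--     "ISO",
--     "JIS",
--     "GB",
--     "BS",
--     "AFNOR",
--     "NF",
--     "UNI",
--     "SIS",
--     "SS",
--     "PN",
--     "CSN",
--     "KS",
--     "AS",
--     "SABS",
-- ]
--
--
-- def _split_country(text):
--     if "," not in text:
--         return text, None
--     head, _, tail = text.rpartition(",")
--     return head.strip(), tail.strip()
--
--
-- def _best_prefix(up):
--     best = None
--     for cand in STANDARD_PREFIXES:
--         if up.startswith(cand) and (best is None or len(cand) > len(best)):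
--             best = cand
--     return best
--
--
-- def parse_standard_info(standard):
--     text = standard.strip() if standard else ""
--     if not text:
--         return None, None, None
--     standard_part, country = _split_country(text)
--     best = _best_prefix(standard_part.upper())
--     if best is not None:
--         return "government", best, country
--     return "proprietary", standard_part, country
-- ===== Notes on version B (the rewrite author's own statement) =====
-- stated objective: simpler
-- what changed: Replaces A's order-dependent first-match-with-break scan of STANDARD_PREFIXES by an order-independent longest-match accumulator loop (plus rpartition instead of the 'in'+rsplit combination for the country split), decomposed into small helpers; equal because overlapping prefixes in the list are nested and listed longest-first.
import Mathlib
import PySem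

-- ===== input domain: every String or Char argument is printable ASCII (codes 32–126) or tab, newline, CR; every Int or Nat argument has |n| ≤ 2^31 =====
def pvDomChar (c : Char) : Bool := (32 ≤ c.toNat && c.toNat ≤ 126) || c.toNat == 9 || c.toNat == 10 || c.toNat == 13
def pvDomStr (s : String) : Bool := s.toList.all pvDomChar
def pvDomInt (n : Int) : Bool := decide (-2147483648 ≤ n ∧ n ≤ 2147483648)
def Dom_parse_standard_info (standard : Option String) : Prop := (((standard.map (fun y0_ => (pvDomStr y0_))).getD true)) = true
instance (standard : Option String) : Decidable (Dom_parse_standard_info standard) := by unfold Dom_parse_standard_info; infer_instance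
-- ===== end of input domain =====

-- B replaces A's order-dependent first-match-with-break prefix loop by an order-independent
-- longest-match accumulator (objective: simpler/idiomatic; equal on A's list because overlapping
-- prefixes are nested and listed longest-first).

def STANDARD_PREFIXES : List String :=
  ["BS EN", "GB/T", "GOST R", "AISI", "ASTM", "UNS", "SAE", "GOST", "DIN", "EN",
   "ISO", "JIS", "GB", "BS", "AFNOR", "NF", "UNI", "SIS", "SS", "PN", "CSN",
   "KS", "AS", "SABS"]

-- ===== PORT A =====
-- A's 'for candidate in STANDARD_PREFIXES: if startswith: prefix = candidate; break'
def pvPrefixLoop (up : String) : List String → Option String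
  | [] => none
  | c :: rest => if PySem.Str.startswith up c then some c else pvPrefixLoop up rest

def parse_standard_info (standard : Option String) : Option String × Option String × Option String :=
  match standard with
  | none => (none, none, none)
  | some s0 =>
    if s0 = "" then (none, none, none)
    else
      let s := PySem.Str.strip s0
      if s = "" then (none, none, none)
      else
        let pc :=
          if PySem.Str.isIn "," s then
            -- rsplit(",", 1): split at the LAST comma (hand port via rfind; exact here since "," ∈ s)
            let i := PySem.Str.rfind s ","
            (PySem.Str.strip (PySem.Str.slice s none (some i)),
             some (PySem.Str.strip (PySem.Str.slice s (some (i + 1)) none)))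
          else (s, none)
        let upper_part := PySem.Str.upper pc.1
        match pvPrefixLoop upper_part STANDARD_PREFIXES with
        | some p => (some "government", some p, pc.2)
        | none => (some "proprietary", some pc.1, pc.2)

-- ===== PORT B =====
def pvSplitCountry (text : String) : String × Option String :=
  if PySem.Str.isIn "," text = false then (text, none)
  else
    -- str.rpartition(","): head/tail around the LAST comma (hand port via rfind; exact, "," ∈ text)
    let i := PySem.Str.rfind text ","
    (PySem.Str.strip (PySem.Str.slice text none (some i)),
     some (PySem.Str.strip (PySem.Str.slice text (some (i + 1)) none)))

def pvStep (up : String) (best : Option String) (cand : String) : Option String :=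
  if PySem.Str.startswith up cand &&
      (match best with
       | none => true
       | some b => decide (PySem.Str.len b < PySem.Str.len cand)) then
    some cand
  else best

def pvBestLoop (up : String) (best : Option String) : List String → Option String
  | [] => best
  | c :: rest => pvBestLoop up (pvStep up best c) rest

def pvBestPrefix (up : String) : Option String :=
  pvBestLoop up none STANDARD_PREFIXES

def parse_standard_info_alt (standard : Option String) : Option String × Option String × Option String :=
  let text :=
    match standard with
    | none => ""
    | some s => if s = "" then "" else PySem.Str.strip s
  if text = "" then (none, none, none)
  else
    let pc := pvSplitCountry text
    match pvBestPrefix (PySem.Str.upper pc.1) with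
    | some b => (some "government", some b, pc.2)
    | none => (some "proprietary", some pc.1, pc.2)

-- ===== PRECONDITION & SPEC =====
def Spec_parse_standard_info (standard : Option String) (out : Option String × Option String × Option String) : Prop := out = parse_standard_info_alt standard
instance (standard : Option String) (out : Option String × Option String × Option String) : Decidable (Spec_parse_standard_info standard out) := by unfold Spec_parse_standard_info; infer_instance

-- ===== CLAIM (what is proved, stated in full; the proofs are below) =====
def Claim_equal_parse_standard_info : Prop := ∀ (standard : Option String), Dom_parse_standard_info standard → Spec_parse_standard_info standard (parse_standard_info standard)

-- ===== LEMMAS AND PROOFS =====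

-- no prefix in the list is a proper prefix of a LATER one (overlaps are listed longest-first)
theorem pvPairwise :
    STANDARD_PREFIXES.Pairwise (fun p q => p.toList <+: q.toList → p = q) := by
  decide

theorem pvPrefixLoop_cons (up c : String) (t : List String) :
    pvPrefixLoop up (c :: t) =
      if PySem.Str.startswith up c then some c else pvPrefixLoop up t := rfl

theorem pvFoldl_stay (up : String) (b : String) :
    ∀ t : List String, (∀ q ∈ t, pvStep up (some b) q = some b) →
      t.foldl (pvStep up) (some b) = some b := by
  intro t
  induction t with
  | nil => intro _; rfl
  | cons c t ih =>
      intro h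
      simp only [List.foldl_cons, h c (by simp)]
      exact ih (fun q hq => h q (by simp [hq]))

theorem pvFirst_eq_best (up : String) :
    ∀ L : List String, L.Pairwise (fun p q => p.toList <+: q.toList → p = q) →
      L.foldl (pvStep up) none = pvPrefixLoop up L := by
  intro L
  induction L with
  | nil => intro _; rfl
  | cons c t ih =>
      intro hp
      rw [List.pairwise_cons] at hp
      obtain ⟨hc, ht⟩ := hp
      by_cases hsw : PySem.Str.startswith up c = true
      · have hstep : pvStep up none c = some c := by
          unfold pvStep
          rw [hsw, Bool.true_and]
          rfl
        have hcpre : c.toList <+: up.toList := by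
          rw [PySem.Str.startswith_eq] at hsw
          exact (PySem.Chars.startswith_iff _ _).mp hsw
        have hstay : ∀ q ∈ t, pvStep up (some c) q = some c := by
          intro q hq
          unfold pvStep
          cases hb : PySem.Str.startswith up q with
          | false =>
              rw [Bool.false_and]
              simp
          | true =>
              have hqpre : q.toList <+: up.toList := by
                rw [PySem.Str.startswith_eq] at hb
                exact (PySem.Chars.startswith_iff _ _).mp hb
              have hql : PySem.Str.len q ≤ PySem.Str.len c := by
                rcases List.prefix_or_prefix_of_prefix hcpre hqpre with h1 | h1
                · rw [hc q hq h1]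
                · rw [PySem.Str.len, PySem.Str.len]
                  exact_mod_cast h1.length_le
              have hm : (match (some c : Option String) with
                  | none => true
                  | some b => decide (PySem.Str.len b < PySem.Str.len q)) = false :=
                decide_eq_false (by omega)
              rw [Bool.true_and, hm]
              simp
        rw [List.foldl_cons, hstep, pvFoldl_stay up c t hstay, pvPrefixLoop_cons, if_pos hsw]
      · have hsw' : PySem.Str.startswith up c = false := by
          cases hb : PySem.Str.startswith up c
          · rfl
          · exact absurd hb hsw
        have hstep : pvStep up none c = none := by
          unfold pvStep
          rw [hsw', Bool.false_and]
          simp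
        rw [List.foldl_cons, hstep, ih ht, pvPrefixLoop_cons,
          if_neg (by rw [hsw']; exact Bool.false_ne_true)]

theorem pvBestLoop_eq_foldl (up : String) :
    ∀ (L : List String) (b : Option String), pvBestLoop up b L = L.foldl (pvStep up) b := by
  intro L
  induction L with
  | nil => intro b; rfl
  | cons c t ih => intro b; rw [List.foldl_cons, ← ih (pvStep up b c)]; rfl

theorem pvBest_eq_loop (up : String) :
    pvBestPrefix up = pvPrefixLoop up STANDARD_PREFIXES := by
  unfold pvBestPrefix
  rw [pvBestLoop_eq_foldl]
  exact pvFirst_eq_best up STANDARD_PREFIXES pvPairwise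

theorem pvSplitCountry_eq (s : String) :
    pvSplitCountry s =
      (if PySem.Str.isIn "," s then
        (PySem.Str.strip (PySem.Str.slice s none (some (PySem.Str.rfind s ","))),
         some (PySem.Str.strip (PySem.Str.slice s (some (PySem.Str.rfind s "," + 1)) none)))
      else (s, none)) := by
  unfold pvSplitCountry
  cases hb : PySem.Str.isIn "," s <;> simp

-- ===== VERDICT (by name: the statement is the Claim_ definition above) =====
theorem parse_standard_info_spec : Claim_equal_parse_standard_info := by
  intro standard _
  unfold Spec_parse_standard_info
  cases standard with
  | none =>
      unfold parse_standard_info parse_standard_info_alt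
      dsimp only []
      rw [if_pos rfl]
  | some s0 =>
      unfold parse_standard_info parse_standard_info_alt
      dsimp only []
      by_cases h0 : s0 = ""
      · rw [if_pos h0, if_pos h0, if_pos rfl]
      · rw [if_neg h0, if_neg h0]
        by_cases hst : PySem.Str.strip s0 = ""
        · rw [if_pos hst, if_pos hst]
        · rw [if_neg hst, if_neg hst, pvSplitCountry_eq, pvBest_eq_loop]
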